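-- pv_equiv track=rewrite | github.com/fonsecayosmel45-debug/T3_Backtracking_9x9 | laberinto.py | backtrack
-- ===== SOURCE A (Python) =====
-- laberinto = [
--     [1,  1,  1,  1, 99, 1, 1, 1, 0],
--     [1, 99, 99, 1, 99, 1, 99, 1, 99],
--     [1,  1, 99, 1,  1, 1, 99, 1, 99],
--     [99, 1, 99, 1, 99, 99, 99, 1, 99],
--     [1,  1, 99, -1, 1, 1, 1, 3, 99],
--     [-2,99, 99, 1, 99, 99, 99, 1,  1],
--     [1, 99, 1, -1, 1, 1, 1, 1, 99],
--     [1, 99,99, 99,99, 2, 99, 1, 99],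
--     [0,  1,  3,  1, 1, 1, 99, 1,  1],
-- ]
--
-- FILAS = len(laberinto)
--
-- COLS  = len(laberinto[0])
--
-- FIN    = (8, 0)
--
-- def backtrack(fila, col, energia, camino, visitados):
--     camino.append((fila, col))
--     visitados.add((fila, col))
--
--     if (fila, col) == FIN:
--         return True, list(camino), energia
--
--
--     movimientos = [(0, -1), (1, 0), (-1, 0), (0, 1)]
--
--     for df, dc in movimientos:
--         nf, nc = fila + df, col + dc
--
--         if not (0 <= nf < FILAS and 0 <= nc < COLS):
--             continue
--
--         if (nf, nc) in visitados:
--             continue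
--
--         valor = laberinto[nf][nc]
--
--         if valor == 99:
--             continue
--
--         nueva_energia = energia - valor
--
--         if nueva_energia < 0:
--             continue
--
--         exito, camino_ok, energia_final = backtrack(
--             nf, nc, nueva_energia, camino, visitados
--         )
--         if exito:
--             return True, camino_ok, energia_final
--
--     camino.pop()
--     visitados.remove((fila, col))
--     return False, [], energia
-- ===== SOURCE B (Python) =====
-- laberinto = [
--     [1,  1,  1,  1, 99, 1, 1, 1, 0],
--     [1, 99, 99, 1, 99, 1, 99, 1, 99],
--     [1,  1, 99, 1,  1, 1, 99, 1, 99],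
--     [99, 1, 99, 1, 99, 99, 99, 1, 99],
--     [1,  1, 99, -1, 1, 1, 1, 3, 99],
--     [-2,99, 99, 1, 99, 99, 99, 1,  1],
--     [1, 99, 1, -1, 1, 1, 1, 1, 99],
--     [1, 99,99, 99,99, 2, 99, 1, 99],
--     [0,  1,  3,  1, 1, 1, 99, 1,  1],
-- ]
--
-- FILAS = len(laberinto)
-- COLS = len(laberinto[0])
-- FIN = (8, 0)
--
--
-- # Pure-functional re-implementation: a recursive helper returns Optional[(path, energy)]
-- # and passes immutable visited sets down, instead of mutating shared camino/visitados
-- # with explicit undo.  Equivalence is about the RETURN value only: B does not mutate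
-- # its camino/visitados arguments.
-- def backtrack(fila, col, energia, camino, visitados):
--     def solve(f, c, e, vis):
--         if (f, c) == FIN:
--             return [(f, c)], e
--         vis = vis | {(f, c)}
--         for df, dc in ((0, -1), (1, 0), (-1, 0), (0, 1)):
--             nf, nc = f + df, c + dc
--             if 0 <= nf < FILAS and 0 <= nc < COLS and (nf, nc) not in vis:
--                 v = laberinto[nf][nc]
--                 if v != 99 and e - v >= 0:
--                     sub = solve(nf, nc, e - v, vis)
--                     if sub is not None:
--                         return [(f, c)] + sub[0], sub[1]
--         return None
--
--     res = solve(fila, col, energia, frozenset(visitados))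
--     if res is None:
--         return False, [], energia
--     return True, list(camino) + res[0], res[1]
-- ===== Notes on version B (the rewrite author's own statement) =====
-- stated objective: alternative
-- what changed: Replaces A's backtracking over shared mutable state (append/add before recursing, pop/remove undo after failure, failure signalled by a (False,[],energia) triple) with a pure recursive helper that passes immutable visited sets down and returns Optional[(path, energy)] built by prepending, so no undo and no state threading is needed; equivalence is about the return value only (B does not mutate camino/visitados).
import Mathlib
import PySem

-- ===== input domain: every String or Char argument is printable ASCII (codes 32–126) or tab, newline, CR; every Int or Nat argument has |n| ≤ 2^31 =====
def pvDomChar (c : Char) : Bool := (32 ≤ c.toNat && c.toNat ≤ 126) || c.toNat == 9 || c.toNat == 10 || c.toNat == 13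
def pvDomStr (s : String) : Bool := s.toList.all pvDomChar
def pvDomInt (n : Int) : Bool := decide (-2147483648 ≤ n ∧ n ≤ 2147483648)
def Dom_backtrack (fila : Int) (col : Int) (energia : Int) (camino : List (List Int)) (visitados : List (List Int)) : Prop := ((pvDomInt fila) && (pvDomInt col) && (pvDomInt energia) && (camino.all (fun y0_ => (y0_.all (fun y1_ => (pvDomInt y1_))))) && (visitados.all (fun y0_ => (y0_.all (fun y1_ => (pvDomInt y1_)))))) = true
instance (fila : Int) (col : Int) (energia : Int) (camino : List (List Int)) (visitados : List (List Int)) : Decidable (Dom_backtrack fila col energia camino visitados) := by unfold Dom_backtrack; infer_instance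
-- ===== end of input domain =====

-- B replaces A's shared-mutable-state backtracking (append/add, recurse, pop/remove undo)
-- by a pure recursive helper returning Option (path, energy) over immutable visited sets;
-- equivalence is about the RETURN value only (B does not mutate camino/visitados).

-- ===== PORT A =====

-- the module-level maze constant (shared data, used by both ports)
def mazeA : List (List Int) :=
  [[1,  1,  1,  1, 99, 1, 1, 1, 0],
   [1, 99, 99, 1, 99, 1, 99, 1, 99],
   [1,  1, 99, 1,  1, 1, 99, 1, 99],
   [99, 1, 99, 1, 99, 99, 99, 1, 99],
   [1,  1, 99, -1, 1, 1, 1, 3, 99],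
   [-2, 99, 99, 1, 99, 99, 99, 1, 1],
   [1, 99, 1, -1, 1, 1, 1, 1, 99],
   [1, 99, 99, 99, 99, 2, 99, 1, 99],
   [0,  1,  3,  1, 1, 1, 99, 1,  1]]

-- laberinto[nf][nc]; exact whenever 0 ≤ nf < 9 and 0 ≤ nc < 9, which both ports check first
def mazeAt (nf nc : Int) : Int := (PySem.List.pyGet? ((PySem.List.pyGet? mazeA nf).getD []) nc).getD 0

def movesA : List (Int × Int) := [(0, -1), (1, 0), (-1, 0), (0, 1)]

-- body of A's `for df, dc in movimientos` loop: Sum.inl = early `return`, Sum.inr = the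
-- threaded (camino, visitados) state mutated/restored by the recursive calls
def stepA (rec : Int → Int → Int → List (List Int) → List (List Int) →
             (Bool × List (List Int) × Int) × List (List Int) × List (List Int))
    (fila col energia : Int)
    (st : Sum ((Bool × List (List Int) × Int) × List (List Int) × List (List Int))
              (List (List Int) × List (List Int)))
    (d : Int × Int) :
    Sum ((Bool × List (List Int) × Int) × List (List Int) × List (List Int))
        (List (List Int) × List (List Int)) :=
  match st with
  | .inl r => .inl r
  | .inr (cam, vis) =>
    let nf := fila + d.1
    let nc := col + d.2
    if ¬ (0 ≤ nf ∧ nf < 9 ∧ 0 ≤ nc ∧ nc < 9) then .inr (cam, vis)      -- continue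
    else if PySem.Set.contains vis [nf, nc] then .inr (cam, vis)        -- continue
    else
      let valor := mazeAt nf nc
      if valor = 99 then .inr (cam, vis)                                -- continue
      else if energia - valor < 0 then .inr (cam, vis)                  -- continue
      else
        let r := rec nf nc (energia - valor) cam vis
        if r.1.1 then .inl r else .inr r.2

-- A's recursion, returning (result, camino, visitados); fuel only makes it total:
-- each call pushes a fresh in-grid cell into visitados, so depth ≤ 82 < 100 always
def goA : Nat → Int → Int → Int → List (List Int) → List (List Int) →
    (Bool × List (List Int) × Int) × List (List Int) × List (List Int)
  | 0, _, _, energia, cam, vis => ((false, [], energia), cam, vis)      -- unreachable fuel guard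
  | fuel + 1, fila, col, energia, cam, vis =>
    let cam := cam ++ [[fila, col]]                                     -- camino.append((fila, col))
    let vis := PySem.Set.add vis [fila, col]                            -- visitados.add((fila, col))
    if fila = 8 ∧ col = 0 then ((true, cam, energia), cam, vis)         -- (fila, col) == FIN
    else
      match movesA.foldl (stepA (goA fuel) fila col energia) (.inr (cam, vis)) with
      | .inl r => r
      | .inr (cam, vis) =>
        -- camino.pop() (cam is nonempty here: it still ends with the appended cell);
        -- visitados.remove((fila, col)) (present: it was added above), so remove? cannot raise
        ((false, [], energia), cam.dropLast, (PySem.Set.remove? vis [fila, col]).getD vis)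

def backtrack (fila : Int) (col : Int) (energia : Int) (camino : List (List Int)) (visitados : List (List Int)) : Bool × List (List Int) × Int :=
  (goA 100 fila col energia camino visitados).1

-- ===== PORT B =====

def movesB : List (Int × Int) := [(0, -1), (1, 0), (-1, 0), (0, 1)]

-- body of B's loop: first move whose guarded recursive call yields a path
def tryB (rec : Int → Int → Int → List (List Int) → Option (List (List Int) × Int))
    (f c e : Int) (vis : List (List Int)) (d : Int × Int) : Option (List (List Int) × Int) :=
  let nf := f + d.1
  let nc := c + d.2
  if 0 ≤ nf ∧ nf < 9 ∧ 0 ≤ nc ∧ nc < 9 ∧ ¬ PySem.Set.contains vis [nf, nc] then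
    let v := mazeAt nf nc
    if v ≠ 99 ∧ 0 ≤ e - v then rec nf nc (e - v) vis else none
  else none

-- B's pure helper `solve`; same fuel bound, same unreachable guard
def solveB : Nat → Int → Int → Int → List (List Int) → Option (List (List Int) × Int)
  | 0, _, _, _, _ => none                                               -- unreachable fuel guard
  | fuel + 1, f, c, e, vis =>
    if f = 8 ∧ c = 0 then some ([[f, c]], e)                            -- (f, c) == FIN
    else
      let vis := PySem.Set.add vis [f, c]                               -- vis = vis | {(f, c)}
      match movesB.findSome? (tryB (solveB fuel) f c e vis) with
      | some (p, e') => some ([f, c] :: p, e')                          -- [(f, c)] + sub[0]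
      | none => none

def backtrack_alt (fila : Int) (col : Int) (energia : Int) (camino : List (List Int)) (visitados : List (List Int)) : Bool × List (List Int) × Int :=
  match solveB 100 fila col energia visitados with
  | some (p, e') => (true, camino ++ p, e')
  | none => (false, [], energia)

-- ===== PRECONDITION & SPEC =====
def Spec_backtrack (fila : Int) (col : Int) (energia : Int) (camino : List (List Int)) (visitados : List (List Int)) (out : Bool × List (List Int) × Int) : Prop := out = backtrack_alt fila col energia camino visitados
instance (fila : Int) (col : Int) (energia : Int) (camino : List (List Int)) (visitados : List (List Int)) (out : Bool × List (List Int) × Int) : Decidable (Spec_backtrack fila col energia camino visitados out) := by unfold Spec_backtrack; infer_instance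

-- ===== CLAIM (what is proved, stated in full; the proofs are below) =====
def Claim_equal_backtrack : Prop := ∀ (fila : Int) (col : Int) (energia : Int) (camino : List (List Int)) (visitados : List (List Int)), Dom_backtrack fila col energia camino visitados → Spec_backtrack fila col energia camino visitados (backtrack fila col energia camino visitados)

-- ===== LEMMAS AND PROOFS =====

-- once the loop has early-returned, the rest of the fold keeps that value
lemma foldl_stepA_inl (rec) (fila col energia : Int) (r) (ms : List (Int × Int)) :
    ms.foldl (stepA rec fila col energia) (.inl r) = .inl r := by
  induction ms with
  | nil => rfl
  | cons d ms ih => simpa [List.foldl, stepA] using ih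

-- undoing the add: if x was fresh, A's pop/remove restores visitados exactly
lemma discard_add_fresh (vis : List (List Int)) (x : List Int)
    (h : PySem.Set.contains vis x = false) :
    PySem.Set.discard (vis ++ [x]) x = vis := by
  simp only [PySem.Set.contains, List.contains_eq_mem, decide_eq_false_iff_not] at h
  simp only [PySem.Set.discard, List.filter_append]
  have h1 : List.filter (fun y => !y == x) vis = vis := by
    apply List.filter_eq_self.2
    intro y hy
    simp only [Bool.not_eq_eq_eq_not, Bool.not_true, beq_eq_false_iff_ne, ne_eq]
    intro he; exact h (he ▸ hy)
  rw [h1]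
  simp

-- one round of A's move loop equals B's findSome? over the same moves, given the
-- induction hypothesis `hrec` about the recursive calls
lemma loop_eq
    (rec : Int → Int → Int → List (List Int) → List (List Int) →
       (Bool × List (List Int) × Int) × List (List Int) × List (List Int))
    (recB : Int → Int → Int → List (List Int) → Option (List (List Int) × Int))
    (hrec : ∀ nf nc e cam vis,
      ((rec nf nc e cam vis).1 =
        (match recB nf nc e vis with
         | some (p, e') => (true, cam ++ p, e')
         | none => (false, [], e))) ∧
      (recB nf nc e vis = none → PySem.Set.contains vis [nf, nc] = false →
        (rec nf nc e cam vis).2 = (cam, vis)))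
    (fila col energia : Int) (vis1 : List (List Int)) :
    ∀ (ms : List (Int × Int)) (cam : List (List Int)),
      (match ms.findSome? (tryB recB fila col energia vis1) with
       | some (p, e') => ∃ r, ms.foldl (stepA rec fila col energia) (.inr (cam, vis1)) = .inl r
           ∧ r.1 = (true, cam ++ p, e')
       | none => ms.foldl (stepA rec fila col energia) (.inr (cam, vis1)) = .inr (cam, vis1)) := by
  intro ms
  induction ms with
  | nil => intro cam; simp [List.findSome?]
  | cons d ms ih =>
    intro cam
    by_cases hb : 0 ≤ fila + d.1 ∧ fila + d.1 < 9 ∧ 0 ≤ col + d.2 ∧ col + d.2 < 9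
    · by_cases hm : PySem.Set.contains vis1 [fila + d.1, col + d.2] = true
      · have htry : tryB recB fila col energia vis1 d = none := by
          simp only [tryB]
          rw [if_neg]
          intro hc; exact absurd hm (by simpa using hc.2.2.2.2)
        have hstep : stepA rec fila col energia (.inr (cam, vis1)) d = .inr (cam, vis1) := by
          simp only [stepA]
          rw [if_neg (by exact fun hc => hc hb), if_pos hm]
        rw [List.findSome?_cons, htry, List.foldl_cons, hstep]
        exact ih cam
      · by_cases hv : mazeAt (fila + d.1) (col + d.2) = 99
        · have htry : tryB recB fila col energia vis1 d = none := by
            simp only [tryB]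
            rw [if_pos ⟨hb.1, hb.2.1, hb.2.2.1, hb.2.2.2, by simpa using hm⟩, if_neg (by simp [hv])]
          have hstep : stepA rec fila col energia (.inr (cam, vis1)) d = .inr (cam, vis1) := by
            simp only [stepA]
            rw [if_neg (by exact fun hc => hc hb), if_neg hm, if_pos hv]
          rw [List.findSome?_cons, htry, List.foldl_cons, hstep]
          exact ih cam
        · by_cases he : energia - mazeAt (fila + d.1) (col + d.2) < 0
          · have htry : tryB recB fila col energia vis1 d = none := by
              simp only [tryB]
              rw [if_pos ⟨hb.1, hb.2.1, hb.2.2.1, hb.2.2.2, by simpa using hm⟩,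
                 if_neg (by intro hc; omega)]
            have hstep : stepA rec fila col energia (.inr (cam, vis1)) d = .inr (cam, vis1) := by
              simp only [stepA]
              rw [if_neg (by exact fun hc => hc hb), if_neg hm, if_neg hv, if_pos he]
            rw [List.findSome?_cons, htry, List.foldl_cons, hstep]
            exact ih cam
          · obtain ⟨h1, h2⟩ := hrec (fila + d.1) (col + d.2)
              (energia - mazeAt (fila + d.1) (col + d.2)) cam vis1
            have htry : tryB recB fila col energia vis1 d =
                recB (fila + d.1) (col + d.2)
                  (energia - mazeAt (fila + d.1) (col + d.2)) vis1 := by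
              simp only [tryB]
              rw [if_pos ⟨hb.1, hb.2.1, hb.2.2.1, hb.2.2.2, by simpa using hm⟩,
                 if_pos ⟨hv, by omega⟩]
            have hstep : stepA rec fila col energia (.inr (cam, vis1)) d =
                (if (rec (fila + d.1) (col + d.2)
                    (energia - mazeAt (fila + d.1) (col + d.2)) cam vis1).1.1 then
                   .inl (rec (fila + d.1) (col + d.2)
                    (energia - mazeAt (fila + d.1) (col + d.2)) cam vis1)
                 else .inr (rec (fila + d.1) (col + d.2)
                    (energia - mazeAt (fila + d.1) (col + d.2)) cam vis1).2) := by
              simp only [stepA]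
              rw [if_neg (by exact fun hc => hc hb), if_neg hm, if_neg hv, if_neg he]
            rw [List.findSome?_cons, htry, List.foldl_cons, hstep]
            cases hr : recB (fila + d.1) (col + d.2)
                (energia - mazeAt (fila + d.1) (col + d.2)) vis1 with
            | some pe =>
              rw [hr] at h1
              rw [if_pos (by rw [h1]), foldl_stepA_inl]
              exact ⟨_, rfl, h1⟩
            | none =>
              rw [hr] at h1
              rw [if_neg (by rw [h1]; simp), h2 hr (by simpa using hm)]
              exact ih cam
    · have htry : tryB recB fila col energia vis1 d = none := by
        simp only [tryB]
        rw [if_neg (fun hc => hb ⟨hc.1, hc.2.1, hc.2.2.1, hc.2.2.2.1⟩)]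
      have hstep : stepA rec fila col energia (.inr (cam, vis1)) d = .inr (cam, vis1) := by
        simp only [stepA]
        rw [if_pos hb]
      rw [List.findSome?_cons, htry, List.foldl_cons, hstep]
      exact ih cam

-- the main simulation: A's threaded recursion against B's pure recursion, plus the
-- restoration invariant A's undo relies on
lemma goA_eq_solveB (fuel : Nat) : ∀ (f c e : Int) (cam vis : List (List Int)),
    ((goA fuel f c e cam vis).1 =
      (match solveB fuel f c e vis with
       | some (p, e') => (true, cam ++ p, e')
       | none => (false, [], e))) ∧
    (solveB fuel f c e vis = none → PySem.Set.contains vis [f, c] = false →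
      (goA fuel f c e cam vis).2 = (cam, vis)) := by
  induction fuel with
  | zero => intro f c e cam vis; exact ⟨rfl, fun _ _ => rfl⟩
  | succ fuel ih =>
    intro f c e cam vis
    by_cases hfin : f = 8 ∧ c = 0
    · constructor
      · simp [goA, solveB, hfin]
      · intro hnone; simp [solveB, hfin] at hnone
    · have hloop := loop_eq (goA fuel) (solveB fuel)
        (fun nf nc e' cam' vis' => ih nf nc e' cam' vis')
        f c e (PySem.Set.add vis [f, c]) movesA (cam ++ [[f, c]])
      have hmoves : movesB = movesA := rfl
      cases hfs : movesA.findSome?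
          (tryB (solveB fuel) f c e (PySem.Set.add vis [f, c])) with
      | some pe =>
        rw [hfs] at hloop
        obtain ⟨r, hfold, hr1⟩ := hloop
        constructor
        · simp only [goA, hfin, if_false]
          rw [hfold]
          simp only [solveB, hfin, if_false, hmoves, hfs]
          simp [hr1]
        · intro hnone
          simp only [solveB, hfin, if_false, hmoves, hfs] at hnone
          exact absurd hnone (by simp)
      | none =>
        rw [hfs] at hloop
        have hsolve : solveB (fuel + 1) f c e vis = none := by
          simp only [solveB, hfin, if_false, hmoves, hfs]
        constructor
        · simp only [goA, hfin, if_false]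
          rw [hloop, hsolve]
        · intro _ hfresh
          have hadd : PySem.Set.add vis [f, c] = vis ++ [[f, c]] := by
            simp only [PySem.Set.add, hfresh]
            simp
          simp only [goA, hfin, if_false]
          rw [hloop]
          simp only []
          rw [hadd]
          have hcont : PySem.Set.contains (vis ++ [[f, c]]) [f, c] = true := by
            simp [PySem.Set.contains]
          rw [PySem.Set.remove?]
          simp only [hcont, if_true, Option.getD_some]
          rw [discard_add_fresh vis [f, c] hfresh]
          simp

-- ===== VERDICT (by name: the statement is the Claim_ definition above) =====
theorem backtrack_spec : Claim_equal_backtrack := by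
  intro fila col energia camino visitados _
  unfold Spec_backtrack backtrack backtrack_alt
  rw [(goA_eq_solveB 100 fila col energia camino visitados).1]
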